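-- pv_equiv track=rewrite | github.com/babiswas/Codepractise | test7.py | balance_arr
-- ===== SOURCE A (Python) =====
-- def balance_arr(arr:list[int])->int:
--     ev_sum=sum([obj for index,obj in enumerate(arr) if index%2==0])
--     odd_sum=sum([obj for index,obj in enumerate(arr) if index%2!=0])
--     sm_evn=0
--     sm_odd=0
--     for i in range(len(arr)):
--         if i%2==0:
--             if ev_sum-sm_evn-arr[i]+sm_odd==odd_sum-sm_odd+sm_evn:
--                 return i
--             sm_evn+=arr[i]
--         else:
--             if ev_sum-sm_evn+sm_odd==odd_sum-sm_odd-arr[i]+sm_evn: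
--                 return i
--             sm_odd+=arr[i]
--     return -1
-- ===== SOURCE B (Python) =====
-- def balance_arr(arr: list[int]) -> int:
--     for i in range(len(arr)):
--         rem = arr[:i] + arr[i+1:]
--         if sum(rem[0::2]) == sum(rem[1::2]):
--             return i
--     return -1
-- ===== Notes on version B (the rewrite author's own statement) =====
-- stated objective: simpler
-- what changed: A maintains running prefix accumulators and an incremental closed-form balance check per index; B evaluates each candidate independently by removing index i and testing whether the alternating sum of the remaining list is zero.
import Mathlib
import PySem

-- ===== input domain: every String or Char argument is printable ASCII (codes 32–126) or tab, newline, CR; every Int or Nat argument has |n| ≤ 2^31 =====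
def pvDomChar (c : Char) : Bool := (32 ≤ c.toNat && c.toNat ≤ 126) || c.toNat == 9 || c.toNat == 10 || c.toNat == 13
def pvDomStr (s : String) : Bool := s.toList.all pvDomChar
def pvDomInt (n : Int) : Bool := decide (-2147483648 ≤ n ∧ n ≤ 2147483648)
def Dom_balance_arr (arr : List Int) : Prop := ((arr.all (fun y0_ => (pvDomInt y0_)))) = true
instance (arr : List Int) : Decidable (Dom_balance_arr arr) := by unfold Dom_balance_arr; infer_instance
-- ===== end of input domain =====

-- B replaces A's incremental closed-form check (running prefix accumulators) by an
-- independent per-candidate re-simulation: remove index i, take the alternating sum of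
-- the remainder, accept i when it is 0. Objective: simpler (no cross-iteration state);
-- B is O(n^2) versus A's O(n).

-- ===== PORT A =====
-- the 'for i in range(len(arr))' loop with early return, over the pyRange index list;
-- state (sm_evn, sm_odd) threaded exactly as in A
def balanceLoopA (arr : List Int) (ev_sum odd_sum : Int) :
    List Int → Int → Int → Int
  | [], _, _ => -1
  | i :: rest, sm_evn, sm_odd =>
    let ai := PySem.List.pyGetD arr i 0   -- arr[i]; i is always in range in this loop
    if PySem.Int.mod i 2 = 0 then
      if ev_sum - sm_evn - ai + sm_odd = odd_sum - sm_odd + sm_evn then i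
      else balanceLoopA arr ev_sum odd_sum rest (sm_evn + ai) sm_odd
    else
      if ev_sum - sm_evn + sm_odd = odd_sum - sm_odd - ai + sm_evn then i
      else balanceLoopA arr ev_sum odd_sum rest sm_evn (sm_odd + ai)

def balance_arr (arr : List Int) : Int :=
  let ev_sum := (((PySem.List.enumerate arr).filter
      (fun p => PySem.Int.mod p.1 2 = 0)).map (fun p => p.2)).sum
  let odd_sum := (((PySem.List.enumerate arr).filter
      (fun p => ¬ PySem.Int.mod p.1 2 = 0)).map (fun p => p.2)).sum
  balanceLoopA arr ev_sum odd_sum (PySem.List.pyRange 0 (arr.length : Int) 1) 0 0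

-- ===== PORT B =====
-- for each candidate i independently: rem = arr[:i] + arr[i+1:], then one signed pass
-- over rem accumulating (diff, sign); accept i when diff == 0
def balanceLoopB (arr : List Int) : List Int → Int
  | [] => -1
  | i :: rest =>
    let rem := PySem.List.slice arr none (some i) ++ PySem.List.slice arr (some (i + 1)) none
    let diff := (rem.foldl (fun (p : Int × Int) x => (p.1 + p.2 * x, -p.2)) (0, 1)).1
    if diff = 0 then i else balanceLoopB arr rest

def balance_arr_alt (arr : List Int) : Int :=
  balanceLoopB arr (PySem.List.pyRange 0 (arr.length : Int) 1)

-- ===== PRECONDITION & SPEC =====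
def Spec_balance_arr (arr : List Int) (out : Int) : Prop := out = balance_arr_alt arr
instance (arr : List Int) (out : Int) : Decidable (Spec_balance_arr arr out) := by unfold Spec_balance_arr; infer_instance

-- ===== CLAIM (what is proved, stated in full; the proofs are below) =====
def Claim_equal_balance_arr : Prop := ∀ (arr : List Int), Dom_balance_arr arr → Spec_balance_arr arr (balance_arr arr)

-- ===== LEMMAS AND PROOFS =====

/-- Alternating sum: `altP [a,b,c,...] = a - b + c - ...`. -/
def altP : List Int → Int
  | [] => 0
  | a :: l => a - altP l

theorem altP_append (l₁ l₂ : List Int) :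
    altP (l₁ ++ l₂) = altP l₁ + (-1) ^ l₁.length * altP l₂ := by
  induction l₁ with
  | nil => simp [altP]
  | cons a l ih => simp [altP, ih, pow_succ]; ring

/-- B's inner fold computes `d + s * altP l`. -/
theorem foldl_alt (l : List Int) : ∀ d s : Int,
    (l.foldl (fun (p : Int × Int) x => (p.1 + p.2 * x, -p.2)) (d, s)).1 = d + s * altP l := by
  induction l with
  | nil => intro d s; simp [altP]
  | cons a l ih => intro d s; simp only [List.foldl_cons, altP, ih]; ring

/-- A's `ev_sum - odd_sum` is the alternating sum (offset-generalised over enumerate). -/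
theorem enum_filter_sub (l : List Int) : ∀ s : Int,
    (((PySem.List.enumerate l s).filter (fun p => PySem.Int.mod p.1 2 = 0)).map
        (fun p => p.2)).sum
      - (((PySem.List.enumerate l s).filter (fun p => ¬ PySem.Int.mod p.1 2 = 0)).map
        (fun p => p.2)).sum
      = (if PySem.Int.mod s 2 = 0 then altP l else -altP l) := by
  induction l with
  | nil => intro s; simp [PySem.List.enumerate_nil, altP]
  | cons a l ih =>
    intro s
    have hs := ih (s + 1)
    have hpar : (PySem.Int.mod (s + 1) 2 = 0) ↔ ¬ (PySem.Int.mod s 2 = 0) := by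
      rw [PySem.Int.mod_eq_zero_iff_dvd, PySem.Int.mod_eq_zero_iff_dvd]
      omega
    rw [PySem.List.enumerate_cons]
    by_cases h : PySem.Int.mod s 2 = 0
    · rw [if_neg (fun hh => (hpar.mp hh) h)] at hs
      simp only [List.filter_cons, decide_eq_true_eq, decide_not, Bool.not_eq_true',
        decide_eq_false_iff_not]
      rw [if_pos h, if_neg (not_not_intro h), if_pos h]
      simp only [List.map_cons, List.sum_cons, altP]
      simp only [decide_not] at hs
      linarith
    · rw [if_pos (hpar.mpr h)] at hs
      simp only [List.filter_cons, decide_eq_true_eq, decide_not, Bool.not_eq_true',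
        decide_eq_false_iff_not]
      rw [if_neg h, if_pos h, if_neg h]
      simp only [List.map_cons, List.sum_cons, altP]
      simp only [decide_not] at hs
      linarith

theorem altP_take_succ (arr : List Int) (j : Nat) (hj : j < arr.length) :
    altP (arr.take (j + 1)) = altP (arr.take j) + (-1) ^ j * arr[j] := by
  have h : arr.take (j + 1) = arr.take j ++ [arr[j]] := by
    rw [List.take_add_one, List.getElem?_eq_getElem hj]; rfl
  rw [h, altP_append]
  simp [altP, Nat.min_eq_left hj.le]

/-- Decomposition of the full alternating sum at position `j`. -/
theorem altP_split (arr : List Int) (j : Nat) (hj : j < arr.length) :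
    altP arr = altP (arr.take j)
      + (-1) ^ j * (arr[j] - altP (arr.drop (j + 1))) := by
  conv_lhs => rw [← List.take_append_drop j arr]
  rw [altP_append, List.drop_eq_getElem_cons hj]
  simp [altP, List.length_take, Nat.min_eq_left hj.le]

/-- Main loop correspondence, by induction on the remaining length. -/
theorem loop_eq (arr : List Int) (ev od : Int) (hev : ev - od = altP arr) :
    ∀ k j (se so : Int), j + k = arr.length → se - so = altP (arr.take j) →
      balanceLoopA arr ev od (PySem.List.pyRange (j : Int) (arr.length : Int) 1) se so
        = balanceLoopB arr (PySem.List.pyRange (j : Int) (arr.length : Int) 1) := by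
  intro k
  induction k with
  | zero =>
    intro j se so hjk _
    rw [PySem.List.pyRange_one_eq_nil (by omega)]
    rfl
  | succ k ih =>
    intro j se so hjk hinv
    have hj : j < arr.length := by omega
    rw [PySem.List.pyRange_one_cons (by exact_mod_cast hj)]
    show (if PySem.Int.mod (j : Int) 2 = 0 then _ else _) = (if _ = (0 : Int) then _ else _)
    have hai : PySem.List.pyGetD arr (j : Int) 0 = arr[j] := by
      rw [PySem.List.pyGetD_natCast, List.getD_eq_getElem?_getD, List.getElem?_eq_getElem hj]
      rfl
    -- B's condition at j is `altP (take j) + (-1)^j * altP (drop (j+1)) = 0`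
    have hrem : PySem.List.slice arr none (some (j : Int))
        ++ PySem.List.slice arr (some ((j : Int) + 1)) none
        = arr.take j ++ arr.drop (j + 1) := by
      have : ((j : Int) + 1) = ((j + 1 : Nat) : Int) := by push_cast; ring
      rw [this, PySem.List.slice_to_natCast, PySem.List.slice_from_natCast]
    have hfold : ((arr.take j ++ arr.drop (j + 1)).foldl
        (fun (p : Int × Int) x => (p.1 + p.2 * x, -p.2)) (0, 1)).1
        = altP (arr.take j) + (-1) ^ j * altP (arr.drop (j + 1)) := by
      rw [foldl_alt, altP_append]
      simp [List.length_take, Nat.min_eq_left hj.le]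
    have hsplit := altP_split arr j hj
    have hpar : (PySem.Int.mod (j : Int) 2 = 0) ↔ (j % 2 = 0) := by
      rw [PySem.Int.mod_eq_zero_iff_dvd]; omega
    have hnext : ((j : Int) + 1) = (((j + 1 : Nat)) : Int) := by push_cast; ring
    by_cases hp : j % 2 = 0
    · have hpow : ((-1 : Int)) ^ j = 1 := Even.neg_one_pow (Nat.even_iff.mpr hp)
      rw [if_pos (hpar.mpr hp)]
      simp only [hrem, hfold, hai]
      rw [hpow] at hsplit hfold ⊢
      by_cases hcond : ev - se - arr[j] + so = od - so + se
      · rw [if_pos hcond, if_pos (by linarith)]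
      · rw [if_neg hcond, if_neg (fun hc => hcond (by linarith)), hnext]
        exact ih (j + 1) (se + arr[j]) so (by omega)
          (by rw [altP_take_succ arr j hj, hpow]; linarith)
    · have hpow : ((-1 : Int)) ^ j = -1 := Odd.neg_one_pow (Nat.odd_iff.mpr (by omega))
      rw [if_neg (fun h => hp (hpar.mp h))]
      simp only [hrem, hfold, hai]
      rw [hpow] at hsplit hfold ⊢
      by_cases hcond : ev - se + so = od - so - arr[j] + se
      · rw [if_pos hcond, if_pos (by linarith)]
      · rw [if_neg hcond, if_neg (fun hc => hcond (by linarith)), hnext]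
        exact ih (j + 1) se (so + arr[j]) (by omega)
          (by rw [altP_take_succ arr j hj, hpow]; linarith)

-- ===== VERDICT (by name: the statement is the Claim_ definition above) =====
theorem balance_arr_spec : Claim_equal_balance_arr := by
  intro arr _
  unfold Spec_balance_arr balance_arr balance_arr_alt
  have hev := enum_filter_sub arr 0
  rw [if_pos (by decide)] at hev
  exact loop_eq arr _ _ hev arr.length 0 0 0 (by simp) (by simp [altP])
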